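-- pv_equiv track=rewrite | github.com/Yasushi-Osugi/WOM_V0R1M0_github_260307 | pysi/db/backfill_product_edge.py | classify_edges_by_bound
-- ===== SOURCE A (Python) =====
-- def dfs_subtree(start_nodes, children):
--     """start_nodes から到達できるノード集合（自分自身含む）"""
--     seen = set()
--     stack = list(start_nodes)
--     while stack:
--         n = stack.pop()
--         if n in seen:
--             continue
--         seen.add(n)
--         stack.extend(children.get(n, []))
--     return seen
--
-- def classify_edges_by_bound(product, edges, children, root):
--     """
--     ルート直下の DAD*/MOM* からサブツリーを取り、child が属する側で bound を決める。
--     ・child ∈ DAD側サブツリー → OUT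
--     ・child ∈ MOM側サブツリー → IN
--     ・両方/どちらでもない → 未分類（warn）
--     """
--     # 直下の子
--     direct_kids = children.get(root, [])
--     dad_heads = [n for n in direct_kids if str(n).upper().startswith("DAD")]
--     mom_heads = [n for n in direct_kids if str(n).upper().startswith("MOM")]
--     sub_out = dfs_subtree(dad_heads, children) if dad_heads else set()
--     sub_in  = dfs_subtree(mom_heads, children) if mom_heads else set()
--     out_edges, in_edges, unknown = [], [], []
--     for p, c in edges:
--         if c in sub_out and c not in sub_in:
--             out_edges.append((p, c))
--         elif c in sub_in and c not in sub_out: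
--             in_edges.append((p, c))
--         elif c in sub_out and c in sub_in:
--             # 通常あり得ないが、守りで unknown 扱い
--             unknown.append((p, c, "BOTH"))
--         else:
--             # DAD/MOM 以外の分岐（データの都合であり得る）。supply_point 直下が未命名など
--             unknown.append((p, c, "NONE"))
--     return out_edges, in_edges, unknown, dad_heads, mom_heads
-- ===== SOURCE B (Python) =====
-- def classify_edges_by_bound(product, edges, children, root):
--     # Single labelled breadth-first propagation from root's DAD*/MOM* heads,
--     # then one lookup per edge, instead of two separate stack DFS subtree sets.
--     direct_kids = children.get(root, [])
--     dad_heads = [n for n in direct_kids if str(n).upper().startswith("DAD")]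
--     mom_heads = [n for n in direct_kids if str(n).upper().startswith("MOM")]
--     labels = {}
--     seen = set()
--     frontier = [(n, "OUT") for n in dad_heads] + [(n, "IN") for n in mom_heads]
--     while frontier:
--         for n, lab in frontier:
--             seen.add((n, lab))
--             labels.setdefault(n, set()).add(lab)
--         frontier = [(k, lab) for n, lab in frontier
--                     for k in children.get(n, []) if (k, lab) not in seen]
--     out_edges, in_edges, unknown = [], [], []
--     for p, c in edges:
--         labs = labels.get(c, set())
--         if labs == {"OUT"}:
--             out_edges.append((p, c))
--         elif labs == {"IN"}:
--             in_edges.append((p, c))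
--         elif labs:
--             unknown.append((p, c, "BOTH"))
--         else:
--             unknown.append((p, c, "NONE"))
--     return out_edges, in_edges, unknown, dad_heads, mom_heads
-- ===== Notes on version B (the rewrite author's own statement) =====
-- stated objective: alternative
-- what changed: Replaces A's two independent stack-based DFS subtree computations and double set-membership tests per edge by a single labelled breadth-first propagation from the DAD*/MOM* heads that accumulates a per-node label set in one dict, classifying each edge by one dict lookup.
import Mathlib
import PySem

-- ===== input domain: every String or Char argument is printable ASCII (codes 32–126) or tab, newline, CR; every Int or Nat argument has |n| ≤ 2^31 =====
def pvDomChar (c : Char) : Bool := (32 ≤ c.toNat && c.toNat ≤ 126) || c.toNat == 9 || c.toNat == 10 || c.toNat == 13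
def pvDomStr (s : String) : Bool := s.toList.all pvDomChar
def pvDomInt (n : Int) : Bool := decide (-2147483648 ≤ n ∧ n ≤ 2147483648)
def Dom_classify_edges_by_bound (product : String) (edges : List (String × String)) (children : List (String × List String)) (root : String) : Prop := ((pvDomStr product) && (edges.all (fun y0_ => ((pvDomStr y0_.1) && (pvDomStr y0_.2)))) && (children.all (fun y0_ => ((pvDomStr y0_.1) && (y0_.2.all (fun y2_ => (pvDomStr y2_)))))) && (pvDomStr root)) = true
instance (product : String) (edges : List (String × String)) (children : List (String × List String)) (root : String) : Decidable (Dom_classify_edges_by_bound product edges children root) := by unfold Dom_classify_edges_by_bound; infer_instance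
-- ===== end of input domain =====

-- B replaces A's two independent stack-DFS subtree sets by one labelled breadth-first
-- propagation from the DAD*/MOM* heads into a per-node label dict, then classifies each
-- edge by a single dict lookup (objective: alternative; same asymptotic cost).

-- ===== PORT A =====
-- helpers for the termination measure of A's while-loop (cited in decreasing_by)
def pvUnivA (children : List (String × List String)) : List String :=
  (PySem.Dict.ofList children).items.flatMap Prod.snd

def pvMeasA (children : List (String × List String)) (seen : PySem.Set String) (stack : List String) : Nat :=
  ((stack.toFinset ∪ (pvUnivA children).toFinset) \ seen.toFinset).card * ((pvUnivA children).length + 1) + stack.length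

theorem pv_sublist_flatMap {α β : Type} {l : List α} {f : α → List β} {a : α} (h : a ∈ l) :
    (f a).Sublist (l.flatMap f) := by
  induction l with
  | nil => cases h
  | cons x xs ih =>
    rw [List.mem_cons] at h
    rcases h with h | h
    · subst h; simp
    · simp only [List.flatMap_cons]
      exact (ih h).trans (List.sublist_append_right _ _)

theorem pv_getD_sublist (d : PySem.Dict String (List String)) (n : String) :
    (d.getD n []).Sublist (d.items.flatMap Prod.snd) := by
  rcases h : d.get? n with _ | v
  · rw [PySem.Dict.getD_eq_get?_getD, h]; simp
  · rw [PySem.Dict.getD_eq_get?_getD, h]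
    have hm := PySem.Dict.mem_items_of_get?_eq_some (h := h)
    simpa using pv_sublist_flatMap (f := Prod.snd) hm

theorem pvMeasA_dec_seen (children : List (String × List String)) (seen : PySem.Set String)
    (stack : List String) (hs : stack ≠ []) :
    pvMeasA children seen stack.dropLast < pvMeasA children seen stack := by
  unfold pvMeasA
  have hsub : stack.dropLast.toFinset ⊆ stack.toFinset := by
    intro x hx
    simp only [List.mem_toFinset] at *
    exact (List.dropLast_sublist stack).subset hx
  have hc : ((stack.dropLast.toFinset ∪ (pvUnivA children).toFinset) \ seen.toFinset).card ≤
      ((stack.toFinset ∪ (pvUnivA children).toFinset) \ seen.toFinset).card := by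
    apply Finset.card_le_card
    exact Finset.sdiff_subset_sdiff (Finset.union_subset_union_left hsub) (Finset.Subset.refl _)
  have hl : stack.dropLast.length < stack.length := by
    rw [List.length_dropLast]
    have : stack.length ≠ 0 := by simpa using hs
    omega
  have := Nat.mul_le_mul_right ((pvUnivA children).length + 1) hc
  omega

theorem pvMeasA_dec_unseen (children : List (String × List String)) (seen : PySem.Set String)
    (stack : List String) (hs : stack ≠ [])
    (hn : ¬ PySem.Set.contains seen (stack.getLast hs) = true) :
    pvMeasA children (PySem.Set.add seen (stack.getLast hs))
      (stack.dropLast ++ PySem.Dict.getD (PySem.Dict.ofList children) (stack.getLast hs) []) <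
      pvMeasA children seen stack := by
  unfold pvMeasA
  set n := stack.getLast hs with hn_def
  set kids := PySem.Dict.getD (PySem.Dict.ofList children) n [] with hk_def
  have hkid : kids.Sublist (pvUnivA children) := by
    rw [hk_def]
    exact pv_getD_sublist _ _
  have hnmem : n ∉ seen := by
    rw [← PySem.Set.contains_iff seen n]; simpa using hn
  have hnstack : n ∈ stack := List.getLast_mem hs
  have hnadd : n ∈ PySem.Set.add seen n := (PySem.Set.mem_add seen n n).mpr (Or.inr rfl)
  -- old sdiff contains n
  have hold : n ∈ (stack.toFinset ∪ (pvUnivA children).toFinset) \ seen.toFinset := by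
    simp [hnstack, hnmem]
  -- new sdiff ⊆ old sdiff erase n
  have hsub : ((stack.dropLast ++ kids).toFinset ∪ (pvUnivA children).toFinset) \ (PySem.Set.add seen n).toFinset ⊆
      ((stack.toFinset ∪ (pvUnivA children).toFinset) \ seen.toFinset).erase n := by
    intro x hx
    simp only [Finset.mem_sdiff, Finset.mem_union, List.mem_toFinset, List.mem_append, Finset.mem_erase] at hx ⊢
    obtain ⟨hx1, hx2⟩ := hx
    have hxne : x ≠ n := by rintro rfl; exact hx2 hnadd
    have hxseen : x ∉ seen := fun hxs => hx2 ((PySem.Set.mem_add seen n x).mpr (Or.inl hxs))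
    refine ⟨hxne, ?_, by simpa using hxseen⟩
    rcases hx1 with (h | h) | h
    · exact Or.inl ((List.dropLast_sublist stack).subset h)
    · exact Or.inr (by simpa using hkid.subset h)
    · exact Or.inr h
  have hcard : (((stack.dropLast ++ kids).toFinset ∪ (pvUnivA children).toFinset) \ (PySem.Set.add seen n).toFinset).card + 1 ≤
      ((stack.toFinset ∪ (pvUnivA children).toFinset) \ seen.toFinset).card := by
    have h1 := Finset.card_le_card hsub
    have h2 := Finset.card_erase_of_mem hold
    have h3 := Finset.card_pos.mpr ⟨n, hold⟩
    omega
  have hklen : kids.length ≤ (pvUnivA children).length := hkid.length_le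
  have hslen : 1 ≤ stack.length := by
    have : stack.length ≠ 0 := by simpa using hs
    omega
  set L := (pvUnivA children).length
  set c' := (((stack.dropLast ++ kids).toFinset ∪ (pvUnivA children).toFinset) \ (PySem.Set.add seen n).toFinset).card
  set c := ((stack.toFinset ∪ (pvUnivA children).toFinset) \ seen.toFinset).card
  have hmul : (c' + 1) * (L + 1) ≤ c * (L + 1) := Nat.mul_le_mul_right _ hcard
  rw [Nat.succ_mul] at hmul
  have hlen : (stack.dropLast ++ kids).length = stack.length - 1 + kids.length := by
    simp [List.length_append, List.length_dropLast]
  rw [hlen]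
  omega

-- the 'while stack:' loop of dfs_subtree
def pvDfsLoop (children : List (String × List String)) (seen : PySem.Set String)
    (stack : List String) : PySem.Set String :=
  if hs : stack = [] then seen
  else
    let n := stack.getLast hs
    if PySem.Set.contains seen n then
      pvDfsLoop children seen stack.dropLast
    else
      pvDfsLoop children (PySem.Set.add seen n)
        (stack.dropLast ++ PySem.Dict.getD (PySem.Dict.ofList children) n [])
termination_by pvMeasA children seen stack
decreasing_by
  · exact pvMeasA_dec_seen children seen stack hs
  · exact pvMeasA_dec_unseen children seen stack hs ‹¬ _›

def dfs_subtree (start_nodes : List String) (children : List (String × List String)) : PySem.Set String :=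
  pvDfsLoop children PySem.Set.empty start_nodes

def classify_edges_by_bound (product : String) (edges : List (String × String)) (children : List (String × List String)) (root : String) : (List (String × String)) × (List (String × String)) × (List (String × String × String)) × List String × List String :=
  let direct_kids := PySem.Dict.getD (PySem.Dict.ofList children) root []
  let dad_heads := direct_kids.filter (fun n => PySem.Str.startswith (PySem.Str.upper n) "DAD")
  let mom_heads := direct_kids.filter (fun n => PySem.Str.startswith (PySem.Str.upper n) "MOM")
  let sub_out := if !dad_heads.isEmpty then dfs_subtree dad_heads children else PySem.Set.empty
  let sub_in := if !mom_heads.isEmpty then dfs_subtree mom_heads children else PySem.Set.empty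
  let t := edges.foldl
    (fun (acc : List (String × String) × List (String × String) × List (String × String × String)) e =>
      if PySem.Set.contains sub_out e.2 && !PySem.Set.contains sub_in e.2 then
        (acc.1 ++ [e], acc.2.1, acc.2.2)
      else if PySem.Set.contains sub_in e.2 && !PySem.Set.contains sub_out e.2 then
        (acc.1, acc.2.1 ++ [e], acc.2.2)
      else if PySem.Set.contains sub_out e.2 && PySem.Set.contains sub_in e.2 then
        (acc.1, acc.2.1, acc.2.2 ++ [(e.1, e.2, "BOTH")])
      else
        (acc.1, acc.2.1, acc.2.2 ++ [(e.1, e.2, "NONE")]))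
    ([], [], [])
  (t.1, t.2.1, t.2.2, dad_heads, mom_heads)

-- ===== PORT B =====
-- the per-round marking of the frontier: seen.add + labels.setdefault(n, set()).add(lab)
def pvMark (seen : PySem.Set (String × String)) (labels : PySem.Dict String (PySem.Set String))
    (frontier : List (String × String)) :
    PySem.Set (String × String) × PySem.Dict String (PySem.Set String) :=
  frontier.foldl
    (fun st q =>
      (PySem.Set.add st.1 q,
       PySem.Dict.insert st.2 q.1 (PySem.Set.add (PySem.Dict.getD st.2 q.1 PySem.Set.empty) q.2)))
    (seen, labels)

-- the next-frontier comprehension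
def pvNext (children : List (String × List String)) (seen : PySem.Set (String × String))
    (frontier : List (String × String)) : List (String × String) :=
  frontier.flatMap (fun q =>
    ((PySem.Dict.getD (PySem.Dict.ofList children) q.1 []).map (fun k => (k, q.2))).filter
      (fun r => !(PySem.Set.contains seen r)))

-- termination measure for B's while-loop (cited in decreasing_by)
def pvMeasB (children : List (String × List String)) (seen : PySem.Set (String × String))
    (frontier : List (String × String)) : Nat :=
  2 * (((frontier.toFinset ∪ (pvUnivA children).toFinset ×ˢ (frontier.map Prod.snd).toFinset) \ seen.toFinset).card)
    + (if frontier = [] then 0 else if frontier.all (fun q => PySem.Set.contains seen q) then 2 else 1)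

theorem pvMark_fst_mem (seen : PySem.Set (String × String)) (labels : PySem.Dict String (PySem.Set String))
    (frontier : List (String × String)) (q : String × String) :
    q ∈ (pvMark seen labels frontier).1 ↔ q ∈ seen ∨ q ∈ frontier := by
  induction frontier generalizing seen labels with
  | nil => simp [pvMark]
  | cons x xs ih =>
    simp only [pvMark, List.foldl_cons] at *
    rw [ih]
    rw [PySem.Set.mem_add seen x q]
    simp only [List.mem_cons]
    tauto

theorem pvNext_mem (children : List (String × List String)) (seen : PySem.Set (String × String))
    (frontier : List (String × String)) (r : String × String) :
    r ∈ pvNext children seen frontier ↔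
      (∃ q ∈ frontier, ∃ k ∈ PySem.Dict.getD (PySem.Dict.ofList children) q.1 [], r = (k, q.2)) ∧
        r ∉ seen := by
  simp only [pvNext, List.mem_flatMap, List.mem_filter, List.mem_map, Bool.not_eq_eq_eq_not,
    Bool.not_true]
  constructor
  · rintro ⟨q, hq, hr, hc⟩
    obtain ⟨k, hk, rfl⟩ := hr
    have hns : (k, q.2) ∉ seen := by
      intro hmem
      rw [← PySem.Set.contains_iff seen (k, q.2)] at hmem
      rw [hmem] at hc
      simp at hc
    exact ⟨⟨q, hq, k, hk, rfl⟩, hns⟩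
  · rintro ⟨⟨q, hq, k, hk, rfl⟩, hns⟩
    refine ⟨q, hq, ⟨k, hk, rfl⟩, ?_⟩
    rw [Bool.eq_false_iff]
    intro hc
    exact hns ((PySem.Set.contains_iff seen (k, q.2)).mp hc)

theorem pvMeasB_dec (children : List (String × List String)) (seen : PySem.Set (String × String))
    (labels : PySem.Dict String (PySem.Set String)) (frontier : List (String × String))
    (hf : frontier ≠ []) :
    pvMeasB children (pvMark seen labels frontier).1 (pvNext children (pvMark seen labels frontier).1 frontier) <
      pvMeasB children seen frontier := by
  unfold pvMeasB
  set C := pvUnivA children with hC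
  set seen' := (pvMark seen labels frontier).1 with hseen'
  set nf := pvNext children seen' frontier with hnf
  have hseen'mem : ∀ q, q ∈ seen' ↔ q ∈ seen ∨ q ∈ frontier := fun q => pvMark_fst_mem _ _ _ q
  have hUsub : (nf.toFinset ∪ C.toFinset ×ˢ (nf.map Prod.snd).toFinset) \ seen'.toFinset ⊆
      (frontier.toFinset ∪ C.toFinset ×ˢ (frontier.map Prod.snd).toFinset) \ seen.toFinset := by
    intro x hx
    simp only [Finset.mem_sdiff, Finset.mem_union, Finset.mem_product, List.mem_toFinset,
      List.mem_map] at hx ⊢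
    obtain ⟨hx1, hx2⟩ := hx
    have hxseen : x ∉ seen := fun h => hx2 ((hseen'mem x).mpr (Or.inl h))
    refine ⟨?_, by simpa using hxseen⟩
    rcases hx1 with h | ⟨h1, a, ha, ha2⟩
    · rw [hnf, pvNext_mem] at h
      obtain ⟨⟨q, hq, k, hk, rfl⟩, _⟩ := h
      refine Or.inr ⟨?_, ⟨q, hq, rfl⟩⟩
      rw [hC]
      unfold pvUnivA
      exact (pv_getD_sublist _ _).subset hk
    · -- x.2 is a label of nf, hence of frontier
      rw [hnf, pvNext_mem] at ha
      obtain ⟨⟨q, hq, k, hk, rfl⟩, _⟩ := ha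
      exact Or.inr ⟨h1, ⟨q, hq, ha2⟩⟩
  by_cases hall : frontier.all (fun q => PySem.Set.contains seen q) = true
  · -- every frontier element already seen: finsets of seen and seen' agree
    have hfe : seen'.toFinset = seen.toFinset := by
      apply Finset.ext
      intro q
      simp only [List.mem_toFinset]
      rw [hseen'mem]
      constructor
      · rintro (h | h)
        · exact h
        · rw [List.all_eq_true] at hall
          exact (PySem.Set.contains_iff seen q).mp (hall q h)
      · exact Or.inl
    have hcard : ((nf.toFinset ∪ C.toFinset ×ˢ (nf.map Prod.snd).toFinset) \ seen'.toFinset).card ≤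
        ((frontier.toFinset ∪ C.toFinset ×ˢ (frontier.map Prod.snd).toFinset) \ seen.toFinset).card :=
      Finset.card_le_card hUsub
    have hflag : (if nf = [] then 0 else if nf.all (fun q => PySem.Set.contains seen' q) then 2 else 1) ≤ 1 := by
      rcases hn : nf with _ | ⟨r, rs⟩
      · simp
      · have hr : r ∈ nf := by rw [hn]; simp
        rw [hnf, pvNext_mem] at hr
        have hcf : PySem.Set.contains seen' r = false := by
          rw [Bool.eq_false_iff]
          intro hc
          exact hr.2 ((PySem.Set.contains_iff seen' r).mp hc)
        have hnall : ¬ (((r :: rs).all fun q => PySem.Set.contains seen' q) = true) := by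
          intro hallx
          rw [List.all_eq_true] at hallx
          have h5 := hallx r (by simp)
          rw [hcf] at h5
          exact Bool.false_ne_true h5
        rw [if_neg (List.cons_ne_nil r rs), if_neg hnall]
    rw [if_neg hf, if_pos hall]
    omega
  · -- some frontier element is new: the sdiff strictly shrinks
    rw [List.all_eq_true] at hall
    push Not at hall
    obtain ⟨q, hq, hqc⟩ := hall
    have hqseen : q ∉ seen := fun h => hqc ((PySem.Set.contains_iff seen q).mpr h)
    have hqold : q ∈ (frontier.toFinset ∪ C.toFinset ×ˢ (frontier.map Prod.snd).toFinset) \ seen.toFinset := by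
      simp only [Finset.mem_sdiff, Finset.mem_union, List.mem_toFinset]
      exact ⟨Or.inl hq, by simpa using hqseen⟩
    have hqnew : q ∉ (nf.toFinset ∪ C.toFinset ×ˢ (nf.map Prod.snd).toFinset) \ seen'.toFinset := by
      simp only [Finset.mem_sdiff, List.mem_toFinset, not_and, not_not]
      intro _
      rw [hseen'mem]
      exact Or.inr hq
    have hsub2 : (nf.toFinset ∪ C.toFinset ×ˢ (nf.map Prod.snd).toFinset) \ seen'.toFinset ⊆
        ((frontier.toFinset ∪ C.toFinset ×ˢ (frontier.map Prod.snd).toFinset) \ seen.toFinset).erase q := by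
      intro x hx
      rw [Finset.mem_erase]
      refine ⟨?_, hUsub hx⟩
      rintro rfl
      exact hqnew hx
    have hcard : ((nf.toFinset ∪ C.toFinset ×ˢ (nf.map Prod.snd).toFinset) \ seen'.toFinset).card + 1 ≤
        ((frontier.toFinset ∪ C.toFinset ×ˢ (frontier.map Prod.snd).toFinset) \ seen.toFinset).card := by
      have h1 := Finset.card_le_card hsub2
      have h2 := Finset.card_erase_of_mem hqold
      have h3 := Finset.card_pos.mpr ⟨q, hqold⟩
      omega
    rw [if_neg hf]
    have hallf : ¬ (frontier.all (fun q => PySem.Set.contains seen q) = true) := by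
      rw [List.all_eq_true]
      push Not
      exact ⟨q, hq, hqc⟩
    rw [if_neg hallf]
    have hflag2 : (if nf = [] then 0 else if nf.all (fun q => PySem.Set.contains seen' q) then 2 else 1) ≤ 2 := by
      split
      · omega
      · split <;> omega
    omega


-- the 'while frontier:' loop of B; returns the final (seen, labels)
def pvBfsLoop (children : List (String × List String)) (seen : PySem.Set (String × String))
    (labels : PySem.Dict String (PySem.Set String)) (frontier : List (String × String)) :
    PySem.Set (String × String) × PySem.Dict String (PySem.Set String) :=
  if hf : frontier = [] then (seen, labels)
  else
    pvBfsLoop children (pvMark seen labels frontier).1 (pvMark seen labels frontier).2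
      (pvNext children (pvMark seen labels frontier).1 frontier)
termination_by pvMeasB children seen frontier
decreasing_by
  exact pvMeasB_dec children seen labels frontier hf

def classify_edges_by_bound_alt (product : String) (edges : List (String × String)) (children : List (String × List String)) (root : String) : (List (String × String)) × (List (String × String)) × (List (String × String × String)) × List String × List String :=
  let direct_kids := PySem.Dict.getD (PySem.Dict.ofList children) root []
  let dad_heads := direct_kids.filter (fun n => PySem.Str.startswith (PySem.Str.upper n) "DAD")
  let mom_heads := direct_kids.filter (fun n => PySem.Str.startswith (PySem.Str.upper n) "MOM")
  let frontier := dad_heads.map (fun n => (n, "OUT")) ++ mom_heads.map (fun n => (n, "IN"))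
  let labels := (pvBfsLoop children PySem.Set.empty PySem.Dict.empty frontier).2
  let t := edges.foldl
    (fun (acc : List (String × String) × List (String × String) × List (String × String × String)) e =>
      let labs := PySem.Dict.getD labels e.2 PySem.Set.empty
      if PySem.Set.equal labs (PySem.Set.ofList ["OUT"]) then
        (acc.1 ++ [e], acc.2.1, acc.2.2)
      else if PySem.Set.equal labs (PySem.Set.ofList ["IN"]) then
        (acc.1, acc.2.1 ++ [e], acc.2.2)
      else if !labs.isEmpty then
        (acc.1, acc.2.1, acc.2.2 ++ [(e.1, e.2, "BOTH")])
      else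
        (acc.1, acc.2.1, acc.2.2 ++ [(e.1, e.2, "NONE")]))
    ([], [], [])
  (t.1, t.2.1, t.2.2, dad_heads, mom_heads)

-- ===== PRECONDITION & SPEC =====
def Spec_classify_edges_by_bound (product : String) (edges : List (String × String)) (children : List (String × List String)) (root : String) (out : (List (String × String)) × (List (String × String)) × (List (String × String × String)) × List String × List String) : Prop := out = classify_edges_by_bound_alt product edges children root
instance (product : String) (edges : List (String × String)) (children : List (String × List String)) (root : String) (out : (List (String × String)) × (List (String × String)) × (List (String × String × String)) × List String × List String) : Decidable (Spec_classify_edges_by_bound product edges children root out) := by unfold Spec_classify_edges_by_bound; infer_instance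

-- ===== CLAIM (what is proved, stated in full; the proofs are below) =====
def Claim_equal_classify_edges_by_bound : Prop := ∀ (product : String) (edges : List (String × String)) (children : List (String × List String)) (root : String), Dom_classify_edges_by_bound product edges children root → Spec_classify_edges_by_bound product edges children root (classify_edges_by_bound product edges children root)

-- ===== LEMMAS AND PROOFS =====
-- reachability spec shared by both characterizations
def pvKids (children : List (String × List String)) (n : String) : List String :=
  PySem.Dict.getD (PySem.Dict.ofList children) n []

def pvStepR (children : List (String × List String)) (a b : String) : Prop :=
  b ∈ pvKids children a

def pvReach (children : List (String × List String)) (starts : List String) (x : String) : Prop :=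
  ∃ s ∈ starts, Relation.ReflTransGen (pvStepR children) s x

def pvStep2 (children : List (String × List String)) (p q : String × String) : Prop :=
  q.1 ∈ pvKids children p.1 ∧ q.2 = p.2

-- unfolding equations for A's loop
theorem pvDfsLoop_eq_nil (children : List (String × List String)) (seen : PySem.Set String) :
    pvDfsLoop children seen [] = seen := by
  rw [pvDfsLoop]
  rfl

theorem pvDfsLoop_eq_seen (children : List (String × List String)) (seen : PySem.Set String)
    (stack : List String) (hs : stack ≠ []) (hc : PySem.Set.contains seen (stack.getLast hs) = true) :
    pvDfsLoop children seen stack = pvDfsLoop children seen stack.dropLast := by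
  rw [pvDfsLoop]
  rw [dif_neg hs, if_pos hc]

theorem pvDfsLoop_eq_unseen (children : List (String × List String)) (seen : PySem.Set String)
    (stack : List String) (hs : stack ≠ []) (hc : ¬ PySem.Set.contains seen (stack.getLast hs) = true) :
    pvDfsLoop children seen stack =
      pvDfsLoop children (PySem.Set.add seen (stack.getLast hs))
        (stack.dropLast ++ PySem.Dict.getD (PySem.Dict.ofList children) (stack.getLast hs) []) := by
  rw [pvDfsLoop]
  rw [dif_neg hs, if_neg hc]

theorem pvDfs_mono (children : List (String × List String)) (seen : PySem.Set String)
    (stack : List String) : ∀ x ∈ seen, x ∈ pvDfsLoop children seen stack := by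
  induction seen, stack using pvDfsLoop.induct children with
  | case1 seen =>
    rw [pvDfsLoop_eq_nil]
    exact fun x hx => hx
  | case2 seen stack hs n hc ih =>
    rw [pvDfsLoop_eq_seen children seen stack hs hc]
    exact ih
  | case3 seen stack hs n hc ih =>
    rw [pvDfsLoop_eq_unseen children seen stack hs hc]
    intro x hx
    exact ih x ((PySem.Set.mem_add seen _ x).mpr (Or.inl hx))

theorem pvDfs_stack (children : List (String × List String)) (seen : PySem.Set String)
    (stack : List String) : ∀ x ∈ stack, x ∈ pvDfsLoop children seen stack := by
  induction seen, stack using pvDfsLoop.induct children with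
  | case1 seen =>
    intro x hx
    cases hx
  | case2 seen stack hs n hc ih =>
    rw [pvDfsLoop_eq_seen children seen stack hs hc]
    intro x hx
    rw [← List.dropLast_concat_getLast hs, List.mem_append, List.mem_singleton] at hx
    rcases hx with hx | rfl
    · exact ih x hx
    · exact pvDfs_mono children seen _ _ ((PySem.Set.contains_iff seen _).mp hc)
  | case3 seen stack hs n hc ih =>
    rw [pvDfsLoop_eq_unseen children seen stack hs hc]
    intro x hx
    rw [← List.dropLast_concat_getLast hs, List.mem_append, List.mem_singleton] at hx
    rcases hx with hx | rfl
    · exact ih x (List.mem_append_left _ hx)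
    · exact pvDfs_mono children _ _ _ ((PySem.Set.mem_add _ _ _).mpr (Or.inr rfl))

theorem pvDfs_closed (children : List (String × List String)) (seen : PySem.Set String)
    (stack : List String) :
    (∀ n ∈ seen, ∀ c ∈ pvKids children n, c ∈ seen ∨ c ∈ stack) →
    ∀ n ∈ pvDfsLoop children seen stack, ∀ c ∈ pvKids children n, c ∈ pvDfsLoop children seen stack := by
  induction seen, stack using pvDfsLoop.induct children with
  | case1 seen =>
    intro hinv n hn c hc
    rw [pvDfsLoop_eq_nil] at *
    rcases hinv n hn c hc with h | h
    · exact h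
    · cases h
  | case2 seen stack hs n hc ih =>
    intro hinv
    rw [pvDfsLoop_eq_seen children seen stack hs hc]
    apply ih
    intro n hn c hcc
    rcases hinv n hn c hcc with h | h
    · exact Or.inl h
    · rw [← List.dropLast_concat_getLast hs, List.mem_append, List.mem_singleton] at h
      rcases h with h | rfl
      · exact Or.inr h
      · exact Or.inl ((PySem.Set.contains_iff seen _).mp hc)
  | case3 seen stack hs n hc ih =>
    intro hinv
    rw [pvDfsLoop_eq_unseen children seen stack hs hc]
    apply ih
    intro m hm c hcc
    rcases (PySem.Set.mem_add seen _ m).mp hm with hm' | rfl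
    · rcases hinv m hm' c hcc with h | h
      · exact Or.inl ((PySem.Set.mem_add seen _ c).mpr (Or.inl h))
      · rw [← List.dropLast_concat_getLast hs, List.mem_append, List.mem_singleton] at h
        rcases h with h | rfl
        · exact Or.inr (List.mem_append_left _ h)
        · exact Or.inl ((PySem.Set.mem_add seen _ _).mpr (Or.inr rfl))
    · exact Or.inr (List.mem_append_right _ hcc)

theorem pvDfs_sound (children : List (String × List String)) (seen : PySem.Set String)
    (stack : List String) :
    ∀ x ∈ pvDfsLoop children seen stack,
      x ∈ seen ∨ ∃ s ∈ stack, Relation.ReflTransGen (pvStepR children) s x := by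
  induction seen, stack using pvDfsLoop.induct children with
  | case1 seen =>
    rw [pvDfsLoop_eq_nil]
    exact fun x hx => Or.inl hx
  | case2 seen stack hs n hc ih =>
    rw [pvDfsLoop_eq_seen children seen stack hs hc]
    intro x hx
    rcases ih x hx with h | ⟨s, hsm, hr⟩
    · exact Or.inl h
    · exact Or.inr ⟨s, (List.dropLast_sublist stack).subset hsm, hr⟩
  | case3 seen stack hs n hc ih =>
    rw [pvDfsLoop_eq_unseen children seen stack hs hc]
    intro x hx
    rcases ih x hx with h | ⟨s, hsm, hr⟩
    · rcases (PySem.Set.mem_add seen _ x).mp h with h' | rfl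
      · exact Or.inl h'
      · exact Or.inr ⟨_, List.getLast_mem hs, Relation.ReflTransGen.refl⟩
    · rw [List.mem_append] at hsm
      rcases hsm with hsm | hsm
      · exact Or.inr ⟨s, (List.dropLast_sublist stack).subset hsm, hr⟩
      · exact Or.inr ⟨stack.getLast hs, List.getLast_mem hs, Relation.ReflTransGen.head hsm hr⟩

theorem pvDfs_char (children : List (String × List String)) (starts : List String) (x : String) :
    x ∈ dfs_subtree starts children ↔ pvReach children starts x := by
  unfold dfs_subtree
  constructor
  · intro hx
    rcases pvDfs_sound children PySem.Set.empty starts x hx with h | h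
    · cases h
    · exact h
  · rintro ⟨s, hsm, hr⟩
    induction hr with
    | refl => exact pvDfs_stack children PySem.Set.empty starts s hsm
    | tail hab hbc ih =>
      exact pvDfs_closed children PySem.Set.empty starts (fun n hn => by cases hn) _ ih _ hbc

-- unfolding equations for B's loop
theorem pvBfsLoop_eq_nil (children : List (String × List String)) (seen : PySem.Set (String × String))
    (labels : PySem.Dict String (PySem.Set String)) :
    pvBfsLoop children seen labels [] = (seen, labels) := by
  rw [pvBfsLoop]
  rfl

theorem pvBfsLoop_eq_cons (children : List (String × List String)) (seen : PySem.Set (String × String))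
    (labels : PySem.Dict String (PySem.Set String)) (frontier : List (String × String))
    (hf : frontier ≠ []) :
    pvBfsLoop children seen labels frontier =
      pvBfsLoop children (pvMark seen labels frontier).1 (pvMark seen labels frontier).2
        (pvNext children (pvMark seen labels frontier).1 frontier) := by
  rw [pvBfsLoop]
  rw [dif_neg hf]

theorem pvBfs_mono (children : List (String × List String)) (seen : PySem.Set (String × String))
    (labels : PySem.Dict String (PySem.Set String)) (frontier : List (String × String)) :
    ∀ q ∈ seen, q ∈ (pvBfsLoop children seen labels frontier).1 := by
  induction seen, labels, frontier using pvBfsLoop.induct children with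
  | case1 seen labels =>
    rw [pvBfsLoop_eq_nil]
    exact fun q hq => hq
  | case2 seen labels frontier hf ih =>
    rw [pvBfsLoop_eq_cons children seen labels frontier hf]
    intro q hq
    exact ih q ((pvMark_fst_mem seen labels frontier q).mpr (Or.inl hq))

theorem pvBfs_front (children : List (String × List String)) (seen : PySem.Set (String × String))
    (labels : PySem.Dict String (PySem.Set String)) (frontier : List (String × String)) :
    ∀ q ∈ frontier, q ∈ (pvBfsLoop children seen labels frontier).1 := by
  intro q hq
  have hf : frontier ≠ [] := by
    intro h
    rw [h] at hq
    cases hq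
  rw [pvBfsLoop_eq_cons children seen labels frontier hf]
  exact pvBfs_mono children _ _ _ q ((pvMark_fst_mem seen labels frontier q).mpr (Or.inr hq))

theorem pvBfs_closed (children : List (String × List String)) (seen : PySem.Set (String × String))
    (labels : PySem.Dict String (PySem.Set String)) (frontier : List (String × String)) :
    (∀ p ∈ seen, ∀ r, pvStep2 children p r → r ∈ seen ∨ r ∈ frontier) →
    ∀ p ∈ (pvBfsLoop children seen labels frontier).1, ∀ r, pvStep2 children p r →
      r ∈ (pvBfsLoop children seen labels frontier).1 := by
  induction seen, labels, frontier using pvBfsLoop.induct children with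
  | case1 seen labels =>
    intro hinv p hp r hr
    rw [pvBfsLoop_eq_nil] at *
    rcases hinv p hp r hr with h | h
    · exact h
    · cases h
  | case2 seen labels frontier hf ih =>
    intro hinv
    rw [pvBfsLoop_eq_cons children seen labels frontier hf]
    apply ih
    intro p hp r hr
    rcases (pvMark_fst_mem seen labels frontier p).mp hp with hp' | hp'
    · rcases hinv p hp' r hr with h | h
      · exact Or.inl ((pvMark_fst_mem seen labels frontier r).mpr (Or.inl h))
      · exact Or.inl ((pvMark_fst_mem seen labels frontier r).mpr (Or.inr h))
    · by_cases hrm : r ∈ (pvMark seen labels frontier).1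
      · exact Or.inl hrm
      · refine Or.inr ?_
        rw [pvNext_mem]
        exact ⟨⟨p, hp', r.1, hr.1, by rw [← hr.2]⟩, hrm⟩
  

theorem pvBfs_sound (children : List (String × List String)) (seen : PySem.Set (String × String))
    (labels : PySem.Dict String (PySem.Set String)) (frontier : List (String × String)) :
    ∀ q ∈ (pvBfsLoop children seen labels frontier).1,
      q ∈ seen ∨ ∃ s ∈ frontier, Relation.ReflTransGen (pvStep2 children) s q := by
  induction seen, labels, frontier using pvBfsLoop.induct children with
  | case1 seen labels =>
    rw [pvBfsLoop_eq_nil]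
    exact fun q hq => Or.inl hq
  | case2 seen labels frontier hf ih =>
    rw [pvBfsLoop_eq_cons children seen labels frontier hf]
    intro q hq
    rcases ih q hq with h | ⟨s, hsm, hr⟩
    · rcases (pvMark_fst_mem seen labels frontier q).mp h with h' | h'
      · exact Or.inl h'
      · exact Or.inr ⟨q, h', Relation.ReflTransGen.refl⟩
    · rw [pvNext_mem] at hsm
      obtain ⟨⟨p, hp, k, hk, rfl⟩, _⟩ := hsm
      exact Or.inr ⟨p, hp, Relation.ReflTransGen.head (b := (k, p.2)) ⟨hk, rfl⟩ hr⟩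

theorem pvMark_labels (seen : PySem.Set (String × String)) (labels : PySem.Dict String (PySem.Set String))
    (frontier : List (String × String))
    (hinv : ∀ n l, l ∈ PySem.Dict.getD labels n PySem.Set.empty ↔ (n, l) ∈ seen) :
    ∀ n l, l ∈ PySem.Dict.getD (pvMark seen labels frontier).2 n PySem.Set.empty ↔
      (n, l) ∈ (pvMark seen labels frontier).1 := by
  induction frontier generalizing seen labels with
  | nil => exact hinv
  | cons q qs ih =>
    simp only [pvMark, List.foldl_cons] at *
    apply ih
    intro n l
    rw [PySem.Dict.getD_insert]
    rw [PySem.Set.mem_add]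
    by_cases hn : n = q.1
    · subst hn
      rw [if_pos rfl]
      rw [PySem.Set.mem_add]
      rw [hinv q.1 l]
      constructor
      · rintro (h | rfl)
        · exact Or.inl h
        · exact Or.inr (by rw [Prod.ext_iff]; exact ⟨rfl, rfl⟩)
      · rintro (h | h)
        · exact Or.inl h
        · exact Or.inr (congrArg Prod.snd h)
    · rw [if_neg hn]
      rw [hinv n l]
      constructor
      · exact Or.inl
      · rintro (h | h)
        · exact h
        · exact absurd (congrArg Prod.fst h) hn

theorem pvBfs_labels (children : List (String × List String)) (seen : PySem.Set (String × String))
    (labels : PySem.Dict String (PySem.Set String)) (frontier : List (String × String)) :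
    (∀ n l, l ∈ PySem.Dict.getD labels n PySem.Set.empty ↔ (n, l) ∈ seen) →
    ∀ n l, l ∈ PySem.Dict.getD (pvBfsLoop children seen labels frontier).2 n PySem.Set.empty ↔
      (n, l) ∈ (pvBfsLoop children seen labels frontier).1 := by
  induction seen, labels, frontier using pvBfsLoop.induct children with
  | case1 seen labels =>
    intro hinv
    rw [pvBfsLoop_eq_nil]
    exact hinv
  | case2 seen labels frontier hf ih =>
    intro hinv
    rw [pvBfsLoop_eq_cons children seen labels frontier hf]
    exact ih (pvMark_labels seen labels frontier hinv)

theorem pvStep2_proj (children : List (String × List String)) (p q : String × String)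
    (h : Relation.ReflTransGen (pvStep2 children) p q) :
    q.2 = p.2 ∧ Relation.ReflTransGen (pvStepR children) p.1 q.1 := by
  induction h with
  | refl => exact ⟨rfl, Relation.ReflTransGen.refl⟩
  | tail hab hbc ih => exact ⟨hbc.2.trans ih.1, ih.2.tail hbc.1⟩

theorem pvStep2_lift (children : List (String × List String)) (l : String) (a b : String)
    (h : Relation.ReflTransGen (pvStepR children) a b) :
    Relation.ReflTransGen (pvStep2 children) (a, l) (b, l) := by
  induction h with
  | refl => exact Relation.ReflTransGen.refl
  | tail hab hbc ih => exact ih.tail ⟨hbc, rfl⟩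

-- characterization of B's final state, started from the empty seen/labels
theorem pvBfs_char (children : List (String × List String)) (frontier : List (String × String))
    (q : String × String) :
    q ∈ (pvBfsLoop children PySem.Set.empty PySem.Dict.empty frontier).1 ↔
      ∃ s ∈ frontier, Relation.ReflTransGen (pvStep2 children) s q := by
  constructor
  · intro hq
    rcases pvBfs_sound children PySem.Set.empty PySem.Dict.empty frontier q hq with h | h
    · cases h
    · exact h
  · rintro ⟨s, hsm, hr⟩
    induction hr with
    | refl => exact pvBfs_front children PySem.Set.empty PySem.Dict.empty frontier s hsm
    | tail hab hbc ih =>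
      exact pvBfs_closed children PySem.Set.empty PySem.Dict.empty frontier
        (fun p hp => by cases hp) _ ih _ hbc

theorem pvBfs_labels_char (children : List (String × List String)) (frontier : List (String × String))
    (n l : String) :
    l ∈ PySem.Dict.getD (pvBfsLoop children PySem.Set.empty PySem.Dict.empty frontier).2 n PySem.Set.empty ↔
      (n, l) ∈ (pvBfsLoop children PySem.Set.empty PySem.Dict.empty frontier).1 := by
  apply pvBfs_labels
  intro n' l'
  constructor
  · intro h
    rw [PySem.Dict.getD_empty] at h
    cases h
  · intro h
    cases h



theorem pvSubtree_char (children : List (String × List String)) (starts : List String) (c : String) :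
    (c ∈ (if !starts.isEmpty then dfs_subtree starts children else PySem.Set.empty)) ↔
      pvReach children starts c := by
  cases starts with
  | nil =>
    simp only [List.isEmpty_nil, Bool.not_true, if_neg]
    constructor
    · intro h; cases h
    · rintro ⟨s, hs, _⟩; cases hs
  | cons a as =>
    simp only [List.isEmpty_cons, Bool.not_false, if_pos]
    exact pvDfs_char children (a :: as) c

theorem pvOut_char (children : List (String × List String)) (dads moms : List String) (c : String) :
    ((c, "OUT") ∈ (pvBfsLoop children PySem.Set.empty PySem.Dict.empty
        (dads.map (fun n => (n, "OUT")) ++ moms.map (fun n => (n, "IN")))).1) ↔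
      pvReach children dads c := by
  rw [pvBfs_char]
  constructor
  · rintro ⟨s, hs, hr⟩
    rw [List.mem_append] at hs
    rcases hs with hs | hs
    · obtain ⟨d, hd, rfl⟩ := List.mem_map.mp hs
      exact ⟨d, hd, (pvStep2_proj children _ _ hr).2⟩
    · obtain ⟨m, hm, rfl⟩ := List.mem_map.mp hs
      have h2 := (pvStep2_proj children _ _ hr).1
      simp at h2
  · rintro ⟨d, hd, hr⟩
    exact ⟨(d, "OUT"), List.mem_append_left _ (List.mem_map.mpr ⟨d, hd, rfl⟩),
      pvStep2_lift children "OUT" d c hr⟩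

theorem pvIn_char (children : List (String × List String)) (dads moms : List String) (c : String) :
    ((c, "IN") ∈ (pvBfsLoop children PySem.Set.empty PySem.Dict.empty
        (dads.map (fun n => (n, "OUT")) ++ moms.map (fun n => (n, "IN")))).1) ↔
      pvReach children moms c := by
  rw [pvBfs_char]
  constructor
  · rintro ⟨s, hs, hr⟩
    rw [List.mem_append] at hs
    rcases hs with hs | hs
    · obtain ⟨d, hd, rfl⟩ := List.mem_map.mp hs
      have h2 := (pvStep2_proj children _ _ hr).1
      simp at h2
    · obtain ⟨m, hm, rfl⟩ := List.mem_map.mp hs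
      exact ⟨m, hm, (pvStep2_proj children _ _ hr).2⟩
  · rintro ⟨m, hm, hr⟩
    exact ⟨(m, "IN"), List.mem_append_right _ (List.mem_map.mpr ⟨m, hm, rfl⟩),
      pvStep2_lift children "IN" m c hr⟩

theorem pvLab_only (children : List (String × List String)) (dads moms : List String) (c l : String)
    (h : (c, l) ∈ (pvBfsLoop children PySem.Set.empty PySem.Dict.empty
        (dads.map (fun n => (n, "OUT")) ++ moms.map (fun n => (n, "IN")))).1) :
    l = "OUT" ∨ l = "IN" := by
  rw [pvBfs_char] at h
  obtain ⟨s, hs, hr⟩ := h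
  have hl := (pvStep2_proj children _ _ hr).1
  rw [List.mem_append] at hs
  rcases hs with hs | hs
  · obtain ⟨d, _, rfl⟩ := List.mem_map.mp hs
    exact Or.inl hl
  · obtain ⟨m, _, rfl⟩ := List.mem_map.mp hs
    exact Or.inr hl

theorem pvStepFun_eq (sub_out sub_in : PySem.Set String) (labels : PySem.Dict String (PySem.Set String))
    (hO : ∀ c, c ∈ sub_out ↔ "OUT" ∈ PySem.Dict.getD labels c PySem.Set.empty)
    (hI : ∀ c, c ∈ sub_in ↔ "IN" ∈ PySem.Dict.getD labels c PySem.Set.empty)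
    (hOnly : ∀ c l, l ∈ PySem.Dict.getD labels c PySem.Set.empty → l = "OUT" ∨ l = "IN")
    (acc : List (String × String) × List (String × String) × List (String × String × String))
    (e : String × String) :
    (if PySem.Set.contains sub_out e.2 && !PySem.Set.contains sub_in e.2 then
        (acc.1 ++ [e], acc.2.1, acc.2.2)
      else if PySem.Set.contains sub_in e.2 && !PySem.Set.contains sub_out e.2 then
        (acc.1, acc.2.1 ++ [e], acc.2.2)
      else if PySem.Set.contains sub_out e.2 && PySem.Set.contains sub_in e.2 then
        (acc.1, acc.2.1, acc.2.2 ++ [(e.1, e.2, "BOTH")])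
      else
        (acc.1, acc.2.1, acc.2.2 ++ [(e.1, e.2, "NONE")])) =
    (let labs := PySem.Dict.getD labels e.2 PySem.Set.empty
      if PySem.Set.equal labs (PySem.Set.ofList ["OUT"]) then
        (acc.1 ++ [e], acc.2.1, acc.2.2)
      else if PySem.Set.equal labs (PySem.Set.ofList ["IN"]) then
        (acc.1, acc.2.1 ++ [e], acc.2.2)
      else if !labs.isEmpty then
        (acc.1, acc.2.1, acc.2.2 ++ [(e.1, e.2, "BOTH")])
      else
        (acc.1, acc.2.1, acc.2.2 ++ [(e.1, e.2, "NONE")])) := by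
  have hOc : PySem.Set.contains sub_out e.2 = true ↔ "OUT" ∈ PySem.Dict.getD labels e.2 PySem.Set.empty := by
    rw [PySem.Set.contains_iff]; exact hO e.2
  have hIc : PySem.Set.contains sub_in e.2 = true ↔ "IN" ∈ PySem.Dict.getD labels e.2 PySem.Set.empty := by
    rw [PySem.Set.contains_iff]; exact hI e.2
  show _ = (if PySem.Set.equal (PySem.Dict.getD labels e.2 PySem.Set.empty) (PySem.Set.ofList ["OUT"]) then _
      else if PySem.Set.equal (PySem.Dict.getD labels e.2 PySem.Set.empty) (PySem.Set.ofList ["IN"]) then _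
      else if !(PySem.Dict.getD labels e.2 PySem.Set.empty).isEmpty then _ else _)
  cases hob : PySem.Set.contains sub_out e.2 <;> cases hib : PySem.Set.contains sub_in e.2
  · -- neither: labs is empty
    have hOut : "OUT" ∉ PySem.Dict.getD labels e.2 PySem.Set.empty := by
      rw [← hOc, hob]; exact Bool.false_ne_true
    have hIn : "IN" ∉ PySem.Dict.getD labels e.2 PySem.Set.empty := by
      rw [← hIc, hib]; exact Bool.false_ne_true
    have hnil : PySem.Dict.getD labels e.2 PySem.Set.empty = [] := by
      rw [List.eq_nil_iff_forall_not_mem]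
      intro l hl
      rcases hOnly e.2 l hl with rfl | rfl
      · exact hOut hl
      · exact hIn hl
    have he1 : PySem.Set.equal (PySem.Dict.getD labels e.2 PySem.Set.empty) (PySem.Set.ofList ["OUT"]) = false := by
      rw [Bool.eq_false_iff]
      intro h
      rw [PySem.Set.equal_iff] at h
      exact hOut ((h "OUT").mpr (by rw [PySem.Set.mem_ofList]; simp))
    have he2 : PySem.Set.equal (PySem.Dict.getD labels e.2 PySem.Set.empty) (PySem.Set.ofList ["IN"]) = false := by
      rw [Bool.eq_false_iff]
      intro h
      rw [PySem.Set.equal_iff] at h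
      exact hIn ((h "IN").mpr (by rw [PySem.Set.mem_ofList]; simp))
    rw [he1, he2]
    simp
    exact hnil
  · -- only IN
    have hOut : "OUT" ∉ PySem.Dict.getD labels e.2 PySem.Set.empty := by
      rw [← hOc, hob]; exact Bool.false_ne_true
    have hIn : "IN" ∈ PySem.Dict.getD labels e.2 PySem.Set.empty := hIc.mp hib
    have he1 : PySem.Set.equal (PySem.Dict.getD labels e.2 PySem.Set.empty) (PySem.Set.ofList ["OUT"]) = false := by
      rw [Bool.eq_false_iff]
      intro h
      rw [PySem.Set.equal_iff] at h
      exact hOut ((h "OUT").mpr (by rw [PySem.Set.mem_ofList]; simp))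
    have he2 : PySem.Set.equal (PySem.Dict.getD labels e.2 PySem.Set.empty) (PySem.Set.ofList ["IN"]) = true := by
      rw [PySem.Set.equal_iff]
      intro x
      rw [PySem.Set.mem_ofList]
      constructor
      · intro hx
        rcases hOnly e.2 x hx with rfl | rfl
        · exact absurd hx hOut
        · simp
      · intro hx
        rw [List.mem_singleton] at hx
        subst hx
        exact hIn
    rw [he1, he2]
    simp
  · -- only OUT
    have hOut : "OUT" ∈ PySem.Dict.getD labels e.2 PySem.Set.empty := hOc.mp hob
    have hIn : "IN" ∉ PySem.Dict.getD labels e.2 PySem.Set.empty := by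
      rw [← hIc, hib]; exact Bool.false_ne_true
    have he1 : PySem.Set.equal (PySem.Dict.getD labels e.2 PySem.Set.empty) (PySem.Set.ofList ["OUT"]) = true := by
      rw [PySem.Set.equal_iff]
      intro x
      rw [PySem.Set.mem_ofList]
      constructor
      · intro hx
        rcases hOnly e.2 x hx with rfl | rfl
        · simp
        · exact absurd hx hIn
      · intro hx
        rw [List.mem_singleton] at hx
        subst hx
        exact hOut
    rw [he1]
    simp
  · -- both
    have hOut : "OUT" ∈ PySem.Dict.getD labels e.2 PySem.Set.empty := hOc.mp hob
    have hIn : "IN" ∈ PySem.Dict.getD labels e.2 PySem.Set.empty := hIc.mp hib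
    have he1 : PySem.Set.equal (PySem.Dict.getD labels e.2 PySem.Set.empty) (PySem.Set.ofList ["OUT"]) = false := by
      rw [Bool.eq_false_iff]
      intro h
      rw [PySem.Set.equal_iff] at h
      have := (h "IN").mp hIn
      rw [PySem.Set.mem_ofList, List.mem_singleton] at this
      exact absurd this (by decide)
    have he2 : PySem.Set.equal (PySem.Dict.getD labels e.2 PySem.Set.empty) (PySem.Set.ofList ["IN"]) = false := by
      rw [Bool.eq_false_iff]
      intro h
      rw [PySem.Set.equal_iff] at h
      have := (h "OUT").mp hOut
      rw [PySem.Set.mem_ofList, List.mem_singleton] at this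
      exact absurd this (by decide)
    have hne : PySem.Dict.getD labels e.2 PySem.Set.empty ≠ [] := List.ne_nil_of_mem hOut
    rw [he1, he2]
    simp
    exact hne

-- ===== VERDICT (by name: the statement is the Claim_ definition above) =====
theorem classify_edges_by_bound_spec : Claim_equal_classify_edges_by_bound := by
  intro product edges children root _
  unfold Spec_classify_edges_by_bound classify_edges_by_bound classify_edges_by_bound_alt
  dsimp only
  set dads := List.filter (fun n => PySem.Str.startswith (PySem.Str.upper n) "DAD")
      ((PySem.Dict.ofList children).getD root []) with hdads
  set moms := List.filter (fun n => PySem.Str.startswith (PySem.Str.upper n) "MOM")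
      ((PySem.Dict.ofList children).getD root []) with hmoms
  set subO := (if (!dads.isEmpty) = true then dfs_subtree dads children else PySem.Set.empty) with hsubO
  set subI := (if (!moms.isEmpty) = true then dfs_subtree moms children else PySem.Set.empty) with hsubI
  set L := (pvBfsLoop children PySem.Set.empty PySem.Dict.empty
      (dads.map (fun n => (n, "OUT")) ++ moms.map (fun n => (n, "IN")))).2 with hL
  have hO : ∀ c, c ∈ subO ↔ "OUT" ∈ PySem.Dict.getD L c PySem.Set.empty := by
    intro c
    rw [hsubO, pvSubtree_char, hL, pvBfs_labels_char, pvOut_char]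
  have hI : ∀ c, c ∈ subI ↔ "IN" ∈ PySem.Dict.getD L c PySem.Set.empty := by
    intro c
    rw [hsubI, pvSubtree_char, hL, pvBfs_labels_char, pvIn_char]
  have hOnly : ∀ c l, l ∈ PySem.Dict.getD L c PySem.Set.empty → l = "OUT" ∨ l = "IN" := by
    intro c l hl
    rw [hL, pvBfs_labels_char] at hl
    exact pvLab_only children dads moms c l hl
  have hfold := PySem.List.foldl_congr_mem (l := edges)
      (init := (([], [], []) : List (String × String) × List (String × String) × List (String × String × String)))
      (f := fun (acc : List (String × String) × List (String × String) × List (String × String × String)) e =>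
        if subO.contains e.2 && !subI.contains e.2 then (acc.1 ++ [e], acc.2.1, acc.2.2)
        else if subI.contains e.2 && !subO.contains e.2 then (acc.1, acc.2.1 ++ [e], acc.2.2)
        else if subO.contains e.2 && subI.contains e.2 then (acc.1, acc.2.1, acc.2.2 ++ [(e.1, e.2, "BOTH")])
        else (acc.1, acc.2.1, acc.2.2 ++ [(e.1, e.2, "NONE")]))
      (g := fun (acc : List (String × String) × List (String × String) × List (String × String × String)) e =>
        if PySem.Set.equal (PySem.Dict.getD L e.2 PySem.Set.empty) (PySem.Set.ofList ["OUT"]) then (acc.1 ++ [e], acc.2.1, acc.2.2)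
        else if PySem.Set.equal (PySem.Dict.getD L e.2 PySem.Set.empty) (PySem.Set.ofList ["IN"]) then (acc.1, acc.2.1 ++ [e], acc.2.2)
        else if !(PySem.Dict.getD L e.2 PySem.Set.empty).isEmpty then (acc.1, acc.2.1, acc.2.2 ++ [(e.1, e.2, "BOTH")])
        else (acc.1, acc.2.1, acc.2.2 ++ [(e.1, e.2, "NONE")]))
      (fun acc x _ => pvStepFun_eq subO subI L hO hI hOnly acc x)
  rw [hfold]
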